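-- pv_equiv track=rewrite | github.com/Gl3ssMug/Python-1 | Programs/Simple_Sample/plagarism.py | plagarism
-- ===== SOURCE A (Python) =====
-- def plagarism(f1,f2):
-- 	c1 = 0
-- 	c2 = 0
-- 	for i in f1:
-- 		if i in f2:
-- 			c1 += 1
-- 	for j in f2:
-- 		if j in f1:
-- 			c2 +=1
--
-- 	return c1,c2
-- ===== SOURCE B (Python) =====
-- def plagarism(f1, f2):
--     s1 = sorted(f1)
--     s2 = sorted(f2)
--     c1 = 0
--     c2 = 0
--     i = 0
--     j = 0
--     while i < len(s1) and j < len(s2):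
--         a = s1[i]
--         b = s2[j]
--         if a < b:
--             i += 1
--         elif b < a:
--             j += 1
--         else:
--             # equal character: its whole run in each list is shared
--             i2 = i
--             while i2 < len(s1) and s1[i2] == a:
--                 i2 += 1
--             j2 = j
--             while j2 < len(s2) and s2[j2] == a:
--                 j2 += 1
--             c1 += i2 - i
--             c2 += j2 - j
--             i = i2
--             j = j2
--     return c1, c2
-- ===== Notes on version B (the rewrite author's own statement) =====
-- stated objective: alternative
-- what changed: B sorts both character sequences and runs a two-pointer merge over the sorted lists, adding whole runs of equal characters to both counts, instead of A's per-character membership scan of the other string.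
import Mathlib
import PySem

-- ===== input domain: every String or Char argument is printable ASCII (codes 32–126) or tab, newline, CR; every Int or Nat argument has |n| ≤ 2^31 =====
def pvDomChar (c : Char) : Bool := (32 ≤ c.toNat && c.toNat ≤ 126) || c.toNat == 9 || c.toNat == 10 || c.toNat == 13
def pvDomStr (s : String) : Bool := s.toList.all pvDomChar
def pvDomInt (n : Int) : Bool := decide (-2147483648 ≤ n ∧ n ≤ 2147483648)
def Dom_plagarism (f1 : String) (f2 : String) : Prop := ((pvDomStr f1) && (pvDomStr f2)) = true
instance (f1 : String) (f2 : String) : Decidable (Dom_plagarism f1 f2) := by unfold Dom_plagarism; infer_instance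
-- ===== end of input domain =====

-- B sorts both character sequences and counts shared characters with a run-based
-- two-pointer merge over the sorted lists, instead of A's per-character scan of
-- the other string (alternative algorithm, same return value).

-- ===== PORT A =====
-- two counting loops; `i in f2` on a 1-char string i is character membership
def plagarism (f1 : String) (f2 : String) : List Int :=
  let c1 : Int := f1.toList.foldl (fun c i => if f2.toList.contains i then c + 1 else c) 0
  let c2 : Int := f2.toList.foldl (fun c j => if f1.toList.contains j then c + 1 else c) 0
  [c1, c2]

-- ===== PORT B =====
-- the outer while loop of Source B: two-pointer merge over the sorted lists; the two
-- inner while loops measuring the run of the common character are the takeWhile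
-- lengths, and advancing i/j past the runs is dropWhile
def pvMergeCount : List Char → List Char → Int × Int
  | [], _ => (0, 0)
  | _ :: _, [] => (0, 0)
  | a :: xs, b :: ys =>
    if a < b then pvMergeCount xs (b :: ys)
    else if b < a then pvMergeCount (a :: xs) ys
    else
      let r1 := ((a :: xs).takeWhile (· == a)).length
      let r2 := ((b :: ys).takeWhile (· == a)).length
      let p := pvMergeCount ((a :: xs).dropWhile (· == a)) ((b :: ys).dropWhile (· == a))
      (p.1 + r1, p.2 + r2)
termination_by xs ys => xs.length + ys.length
decreasing_by
  · simp
  · simp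
  · have hb : (b == a) = true := by
      have : a = b := le_antisymm (not_lt.mp (by assumption)) (not_lt.mp (by assumption))
      simp [this]
    simp only [List.dropWhile_cons, beq_self_eq_true, if_pos, hb, List.length_cons]
    have h1 := List.length_dropWhile_le (p := (· == a)) (l := xs)
    have h2 := List.length_dropWhile_le (p := (· == a)) (l := ys)
    omega

def plagarism_alt (f1 : String) (f2 : String) : List Int :=
  let s1 := PySem.List.sorted f1.toList (fun c => c) false
  let s2 := PySem.List.sorted f2.toList (fun c => c) false
  let p := pvMergeCount s1 s2
  [p.1, p.2]

-- ===== PRECONDITION & SPEC =====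
def Spec_plagarism (f1 : String) (f2 : String) (out : List Int) : Prop := out = plagarism_alt f1 f2
instance (f1 : String) (f2 : String) (out : List Int) : Decidable (Spec_plagarism f1 f2 out) := by unfold Spec_plagarism; infer_instance

-- ===== CLAIM =====
def Claim_equal_plagarism : Prop := ∀ (f1 : String) (f2 : String), Dom_plagarism f1 f2 → Spec_plagarism f1 f2 (plagarism f1 f2)

-- ===== LEMMAS AND PROOFS =====

-- A's loop counts the elements satisfying the test
theorem pvFoldlCount (l : List Char) (P : Char → Bool) (a : Int) :
    l.foldl (fun c i => if P i then c + 1 else c) a = a + l.countP P := by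
  induction l generalizing a with
  | nil => simp
  | cons x xs ih =>
    simp only [List.foldl_cons, List.countP_cons, ih]
    by_cases h : P x
    · simp [h]; ring
    · simp [h]

-- on a sorted list whose elements are all ≥ a, everything after the run of a's is > a
theorem pvDropWhileGt (l : List Char) (a : Char) (hs : l.Pairwise (· ≤ ·))
    (hall : ∀ x ∈ l, a ≤ x) : ∀ x ∈ l.dropWhile (· == a), a < x := by
  induction l with
  | nil => simp
  | cons h t ih =>
    rw [List.pairwise_cons] at hs
    by_cases hh : (h == a) = true
    · rw [List.dropWhile_cons, if_pos hh]
      exact ih hs.2 (fun x hx => hall x (List.mem_cons_of_mem _ hx))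
    · rw [List.dropWhile_cons, if_neg hh]
      intro x hx
      have hha : a < h := lt_of_le_of_ne (hall h (List.mem_cons_self))
        (fun e => hh (by simp [e.symm]))
      rcases List.mem_cons.mp hx with rfl | hx
      · exact hha
      · exact lt_of_lt_of_le hha (hs.1 x hx)

-- pvMergeCount on sorted lists computes the two mutual-membership counts
theorem pvMergeCount_eq (xs ys : List Char) (hx : xs.Pairwise (· ≤ ·))
    (hy : ys.Pairwise (· ≤ ·)) :
    pvMergeCount xs ys =
      ((xs.countP (fun c => ys.contains c) : Int),
       (ys.countP (fun c => xs.contains c) : Int)) := by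
  induction xs, ys using pvMergeCount.induct with
  | case1 ys => simp [pvMergeCount]
  | case2 a xs => simp [pvMergeCount]
  | case3 a xs b ys hab ih =>
    rw [List.pairwise_cons] at hx
    have hyall : ∀ y ∈ b :: ys, a < y := by
      intro y hyv
      rcases List.mem_cons.mp hyv with rfl | h
      · exact hab
      · exact lt_of_lt_of_le hab ((List.pairwise_cons.mp hy).1 y h)
    have hanotin : a ∉ b :: ys := fun h => absurd (hyall a h) (lt_irrefl a)
    have hA : List.countP (fun c => (b :: ys).contains c) (a :: xs)
        = List.countP (fun c => (b :: ys).contains c) xs := by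
      rw [List.countP_cons]
      simp [List.contains_eq_mem, hanotin]
    have hB : List.countP (fun c => (a :: xs).contains c) (b :: ys)
        = List.countP (fun c => List.contains xs c) (b :: ys) := by
      apply List.countP_congr
      intro y hyv
      simp [List.contains_eq_mem, List.mem_cons, (hyall y hyv).ne']
    rw [pvMergeCount, if_pos hab, ih hx.2 hy, hA, hB]
  | case4 a xs b ys hab hba ih =>
    rw [List.pairwise_cons] at hy
    have hxall : ∀ y ∈ a :: xs, b < y := by
      intro y hyv
      rcases List.mem_cons.mp hyv with rfl | h
      · exact hba
      · exact lt_of_lt_of_le hba ((List.pairwise_cons.mp hx).1 y h)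
    have hbnotin : b ∉ a :: xs := fun h => absurd (hxall b h) (lt_irrefl b)
    have hA : List.countP (fun c => (b :: ys).contains c) (a :: xs)
        = List.countP (fun c => List.contains ys c) (a :: xs) := by
      apply List.countP_congr
      intro y hyv
      simp [List.contains_eq_mem, List.mem_cons, (hxall y hyv).ne']
    have hB : List.countP (fun c => (a :: xs).contains c) (b :: ys)
        = List.countP (fun c => (a :: xs).contains c) ys := by
      rw [List.countP_cons]
      simp [List.contains_eq_mem, hbnotin]
    rw [pvMergeCount, if_neg hab, if_pos hba, ih hx hy.2, hA, hB]
  | case5 a xs b ys hab hba ih =>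
    have hba' : b = a := le_antisymm (not_lt.mp hab) (not_lt.mp hba)
    subst hba'
    have hallx : ∀ x ∈ b :: xs, b ≤ x := by
      intro x hxm
      rcases List.mem_cons.mp hxm with rfl | h
      · exact le_refl _
      · exact (List.pairwise_cons.mp hx).1 x h
    have hally : ∀ x ∈ b :: ys, b ≤ x := by
      intro x hxm
      rcases List.mem_cons.mp hxm with rfl | h
      · exact le_refl _
      · exact (List.pairwise_cons.mp hy).1 x h
    have hd1 := pvDropWhileGt (b :: xs) b hx hallx
    have hd2 := pvDropWhileGt (b :: ys) b hy hally
    have hs1 : ((b :: xs).dropWhile (· == b)).Pairwise (· ≤ ·) :=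
      hx.sublist (List.dropWhile_sublist _)
    have hs2 : ((b :: ys).dropWhile (· == b)).Pairwise (· ≤ ·) :=
      hy.sublist (List.dropWhile_sublist _)
    have hmemgen : ∀ (L : List Char) (x : Char), b < x →
        (L.contains x) = ((L.dropWhile (· == b)).contains x) := by
      intro L x hbx
      have : x ∈ L ↔ x ∈ L.dropWhile (· == b) := by
        constructor
        · intro h
          rcases List.mem_append.mp ((List.takeWhile_append_dropWhile (p := (· == b)) (l := L)) ▸ h) with h' | h'
          · exact absurd (eq_of_beq (List.mem_takeWhile_imp (p := (· == b)) h')) hbx.ne'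
          · exact h'
        · intro h; exact (List.dropWhile_sublist _).mem h
      simp [List.contains_eq_mem, this]
    have hc1 : List.countP (fun c => ((b :: ys).dropWhile (· == b)).contains c) ((b :: xs).dropWhile (· == b))
        = List.countP (fun c => (b :: ys).contains c) ((b :: xs).dropWhile (· == b)) := by
      apply List.countP_congr
      intro x hxm
      rw [hmemgen (b :: ys) x (hd1 x hxm)]
    have hc2 : List.countP (fun c => ((b :: xs).dropWhile (· == b)).contains c) ((b :: ys).dropWhile (· == b))
        = List.countP (fun c => (b :: xs).contains c) ((b :: ys).dropWhile (· == b)) := by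
      apply List.countP_congr
      intro x hxm
      rw [hmemgen (b :: xs) x (hd2 x hxm)]
    have htake1 : List.countP (fun c => (b :: ys).contains c) ((b :: xs).takeWhile (· == b))
        = ((b :: xs).takeWhile (· == b)).length := by
      apply List.countP_eq_length.mpr
      intro x hxm
      have := eq_of_beq (List.mem_takeWhile_imp (p := (· == b)) hxm)
      subst this
      simp [List.contains_eq_mem]
    have htake2 : List.countP (fun c => (b :: xs).contains c) ((b :: ys).takeWhile (· == b))
        = ((b :: ys).takeWhile (· == b)).length := by
      apply List.countP_eq_length.mpr
      intro x hxm
      have := eq_of_beq (List.mem_takeWhile_imp (p := (· == b)) hxm)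
      subst this
      simp [List.contains_eq_mem]
    have hsplit1 : List.countP (fun c => (b :: ys).contains c) (b :: xs)
        = ((b :: xs).takeWhile (· == b)).length
          + List.countP (fun c => (b :: ys).contains c) ((b :: xs).dropWhile (· == b)) := by
      conv_lhs => rw [← List.takeWhile_append_dropWhile (p := (· == b)) (l := b :: xs)]
      rw [List.countP_append, htake1]
    have hsplit2 : List.countP (fun c => (b :: xs).contains c) (b :: ys)
        = ((b :: ys).takeWhile (· == b)).length
          + List.countP (fun c => (b :: xs).contains c) ((b :: ys).dropWhile (· == b)) := by
      conv_lhs => rw [← List.takeWhile_append_dropWhile (p := (· == b)) (l := b :: ys)]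
      rw [List.countP_append, htake2]
    rw [pvMergeCount, if_neg hab, if_neg hba]
    simp only [ih hs1 hs2, hc1, hc2, hsplit1, hsplit2, Prod.mk.injEq]
    constructor <;> push_cast <;> ring

-- ===== VERDICT =====
theorem plagarism_spec : Claim_equal_plagarism := by
  intro f1 f2 _
  unfold Spec_plagarism
  simp only [plagarism, plagarism_alt]
  have h1 := PySem.List.sorted_pairwise (xs := f1.toList) (key := fun c : Char => c)
  have h2 := PySem.List.sorted_pairwise (xs := f2.toList) (key := fun c : Char => c)
  have hp1 := PySem.List.sorted_perm (xs := f1.toList) (key := fun c : Char => c) (rev := false)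
  have hp2 := PySem.List.sorted_perm (xs := f2.toList) (key := fun c : Char => c) (rev := false)
  rw [pvMergeCount_eq _ _ h1 h2]
  simp only [pvFoldlCount, Int.zero_add]
  have e1 : List.countP (fun c => (PySem.List.sorted f2.toList (fun c => c) false).contains c)
        (PySem.List.sorted f1.toList (fun c => c) false)
      = List.countP (fun c => f2.toList.contains c) f1.toList := by
    rw [hp1.countP_eq]
    apply List.countP_congr
    intro x _
    simp [List.contains_eq_mem, hp2.mem_iff]
  have e2 : List.countP (fun c => (PySem.List.sorted f1.toList (fun c => c) false).contains c)
        (PySem.List.sorted f2.toList (fun c => c) false)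
      = List.countP (fun c => f1.toList.contains c) f2.toList := by
    rw [hp2.countP_eq]
    apply List.countP_congr
    intro x _
    simp [List.contains_eq_mem, hp1.mem_iff]
  rw [e1, e2]
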